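-- pv_equiv track=rewrite | github.com/spriteboysz/LeetcodePython | algorithm/P2099. 找到和最大的长度为-k-的子序列.py | maxSubsequence
-- ===== SOURCE A (Python) =====
-- from typing import List
--
-- def maxSubsequence(nums: List[int], k: int) -> List[int]:
--     sequence = list(sorted(nums, reverse=True))[:k]
--     subsequence = []
--     for num in nums:
--         if num in sequence:
--             subsequence.append(num)
--             sequence.remove(num)
--     return subsequence
-- ===== SOURCE B (Python) =====
-- from typing import List
--
-- def maxSubsequence(nums: List[int], k: int) -> List[int]:
--     if k <= 0:
--         return []
--     if k >= len(nums):
--         return list(nums)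
--     t = sorted(nums, reverse=True)[k - 1]
--     ties = k - sum(1 for x in nums if x > t)
--     out = []
--     for x in nums:
--         if x > t:
--             out.append(x)
--         elif x == t and ties > 0:
--             out.append(x)
--             ties -= 1
--     return out
-- ===== Notes on version B (the rewrite author's own statement) =====
-- stated objective: faster
-- what changed: Replaces A's take-top-k-then-membership-scan-with-remove (an O(n) 'in'/remove inside the loop) by a threshold value t = k-th largest plus a tie counter, so the selection pass is O(1) per element.
-- outside the precondition, e.g. on maxSubsequence([3, 1, 2], -1): A returns [3, 2], B returns []
import Mathlib
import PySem

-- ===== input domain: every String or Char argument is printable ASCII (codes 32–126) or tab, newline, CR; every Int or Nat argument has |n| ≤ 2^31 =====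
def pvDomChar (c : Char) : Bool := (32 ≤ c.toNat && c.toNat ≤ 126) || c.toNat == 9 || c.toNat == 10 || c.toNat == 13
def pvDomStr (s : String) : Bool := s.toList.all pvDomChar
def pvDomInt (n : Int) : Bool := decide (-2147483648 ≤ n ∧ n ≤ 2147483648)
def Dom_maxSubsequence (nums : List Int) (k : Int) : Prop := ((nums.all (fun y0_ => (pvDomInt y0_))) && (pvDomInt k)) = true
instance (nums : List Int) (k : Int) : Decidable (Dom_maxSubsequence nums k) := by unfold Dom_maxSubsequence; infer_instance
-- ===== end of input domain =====

-- B replaces A's top-k membership-and-remove scan by a threshold t (the k-th largest) plus a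
-- tie counter, so the selection pass does no inner list scan.

-- ===== PORT A =====
-- one loop step of A: 'if num in sequence: subsequence.append(num); sequence.remove(num)'
def aStep (st : List Int × List Int) (num : Int) : List Int × List Int :=
  if st.2.contains num then (st.1 ++ [num], (PySem.List.remove? st.2 num).getD st.2) else st

def maxSubsequence (nums : List Int) (k : Int) : List Int :=
  -- sequence = list(sorted(nums, reverse=True))[:k], then the loop over nums
  (nums.foldl aStep ([], PySem.List.slice (PySem.List.sorted nums (fun x => x) true) none (some k))).1

-- ===== PORT B =====
-- one loop step of B: 'if x > t: out.append(x)  elif x == t and ties > 0: out.append(x); ties -= 1'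
def bStep (t : Int) (st : List Int × Int) (x : Int) : List Int × Int :=
  if t < x then (st.1 ++ [x], st.2)
  else if x = t ∧ 0 < st.2 then (st.1 ++ [x], st.2 - 1)
  else st

def maxSubsequence_alt (nums : List Int) (k : Int) : List Int :=
  if k ≤ 0 then []
  else if (nums.length : Int) ≤ k then nums
  else
    match PySem.List.pyGet? (PySem.List.sorted nums (fun x => x) true) (k - 1) with
    | none => []  -- unreachable: 1 ≤ k < len(nums), so the index k-1 is in range
    | some t =>
      -- ties = k - sum(1 for x in nums if x > t), then the loop over nums
      (nums.foldl (bStep t) ([], k - (nums.countP (fun x => decide (t < x)) : Int))).1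

-- ===== PRECONDITION & SPEC =====
-- Pre_ covers the problem's natural domain k ≥ 0 (and the negative k whose slice [:k] is
-- empty): for negative k with len(nums)+k > 0, Python slice semantics make A return the
-- largest len(nums)+k elements, a value outside the task's intent that B does not reproduce.
def Pre_maxSubsequence (nums : List Int) (k : Int) : Prop := 0 ≤ k ∨ (nums.length : Int) + k ≤ 0
instance (nums : List Int) (k : Int) : Decidable (Pre_maxSubsequence nums k) := by
  unfold Pre_maxSubsequence; infer_instance

def pvWitness_maxSubsequence : List Int × Int := ([3, 1, 2], 2)

def Spec_maxSubsequence (nums : List Int) (k : Int) (out : List Int) : Prop := out = maxSubsequence_alt nums k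
instance (nums : List Int) (k : Int) (out : List Int) : Decidable (Spec_maxSubsequence nums k out) := by unfold Spec_maxSubsequence; infer_instance

-- ===== CLAIM (what is proved, stated in full; the proofs are below) =====
def Claim_equal_maxSubsequence : Prop := ∀ (nums : List Int) (k : Int), Dom_maxSubsequence nums k → Pre_maxSubsequence nums k → Spec_maxSubsequence nums k (maxSubsequence nums k)

-- ===== LEMMAS AND PROOFS =====

-- A's loop with an empty remaining pool never appends.
theorem foldA_nil_pool (suf : List Int) (acc : List Int) :
    suf.foldl aStep (acc, []) = (acc, []) := by
  induction suf generalizing acc with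
  | nil => rfl
  | cons x xs ih => simpa [aStep] using ih acc

-- A's loop when the remaining input is a sub-multiset of the pool: everything is appended.
theorem foldA_all (suf : List Int) (acc : List Int) (seq : List Int)
    (h : ∀ v, suf.count v ≤ seq.count v) : (suf.foldl aStep (acc, seq)).1 = acc ++ suf := by
  induction suf generalizing acc seq with
  | nil => simp
  | cons x xs ih =>
    have hx : 0 < List.count x seq := by
      have := h x; rw [List.count_cons_self] at this; omega
    have hxm : x ∈ seq := List.count_pos_iff.mp hx
    have hc : seq.contains x = true := by simpa using hxm
    have hrem := PySem.List.remove?_eq_some_erase seq x hxm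
    have h' : ∀ v, xs.count v ≤ (seq.erase x).count v := by
      intro v
      by_cases hvx : v = x
      · subst hvx
        have := h v; rw [List.count_cons_self] at this
        rw [List.count_erase_self]; omega
      · have := h v; rw [List.count_cons_of_ne (fun e => hvx e.symm)] at this
        rw [List.count_erase_of_ne hvx]; exact this
    simp only [List.foldl_cons, aStep, hc, if_true, hrem, Option.getD_some]
    simpa using ih (acc ++ [x]) (seq.erase x) h'

-- The main invariant: when the pool holds every remaining element above the threshold t,
-- nothing below it, and exactly 'ties' copies of t, A's loop and B's loop agree.
theorem foldAB (t : Int) (suf : List Int) (acc : List Int) (seq : List Int) (ties : Int)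
    (hgt : ∀ v, t < v → seq.count v = suf.count v)
    (hlt : ∀ v, v < t → seq.count v = 0)
    (hti : (seq.count t : Int) = ties) :
    (suf.foldl aStep (acc, seq)).1 = (suf.foldl (bStep t) (acc, ties)).1 := by
  induction suf generalizing acc seq ties with
  | nil => rfl
  | cons x xs ih =>
    simp only [List.foldl_cons]
    rcases lt_trichotomy t x with hxt | hxt | hxt
    · -- x > t : A finds x in the pool; B appends unconditionally
      have hx : 0 < List.count x seq := by
        rw [hgt x hxt, List.count_cons_self]; omega
      have hxm : x ∈ seq := List.count_pos_iff.mp hx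
      have hc : seq.contains x = true := by simpa using hxm
      have hrem := PySem.List.remove?_eq_some_erase seq x hxm
      simp only [aStep, bStep, hc, if_true, hrem, Option.getD_some, if_pos hxt]
      refine ih (acc ++ [x]) (seq.erase x) ties ?_ ?_ ?_
      · intro v hv
        by_cases hvx : v = x
        · subst hvx
          rw [List.count_erase_self, hgt v hv, List.count_cons_self]
          omega
        · rw [List.count_erase_of_ne hvx, hgt v hv,
              List.count_cons_of_ne (fun e => hvx e.symm)]
      · intro v hv
        have h1 := (List.erase_sublist (a := x) (l := seq)).count_le v
        have h2 := hlt v hv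
        omega
      · rw [List.count_erase_of_ne (by omega : t ≠ x)]; exact hti
    · -- x == t : A finds t in the pool iff a copy of t remains, i.e. iff ties > 0
      subst hxt
      by_cases hp : 0 < ties
      · have hx : 0 < List.count t seq := by omega
        have hxm : t ∈ seq := List.count_pos_iff.mp hx
        have hc : seq.contains t = true := by simpa using hxm
        have hrem := PySem.List.remove?_eq_some_erase seq t hxm
        simp only [aStep, bStep, hc, if_true, hrem, Option.getD_some,
          if_neg (lt_irrefl t)]
        rw [if_pos (⟨trivial, hp⟩ : True ∧ 0 < ties)]
        refine ih (acc ++ [t]) (seq.erase t) (ties - 1) ?_ ?_ ?_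
        · intro v hv
          rw [List.count_erase_of_ne (by omega : v ≠ t), hgt v hv,
              List.count_cons_of_ne (by omega : t ≠ v)]
        · intro v hv
          have h1 := (List.erase_sublist (a := t) (l := seq)).count_le v
          have h2 := hlt v hv
          omega
        · rw [List.count_erase_self]; omega
      · have hx : List.count t seq = 0 := by omega
        have hxm : t ∉ seq := by rw [← List.count_pos_iff]; omega
        have hc : seq.contains t = false := by simpa using hxm
        simp only [aStep, bStep, hc, Bool.false_eq_true, if_false,
          if_neg (lt_irrefl t)]
        rw [if_neg (fun h : True ∧ 0 < ties => hp h.2)]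
        refine ih acc seq ties ?_ hlt hti
        intro v hv
        rw [hgt v hv, List.count_cons_of_ne (by omega : t ≠ v)]
    · -- x < t : the pool holds nothing below t; neither side appends
      have hxm : x ∉ seq := by rw [← List.count_pos_iff]; rw [hlt x hxt]; omega
      have hc : seq.contains x = false := by simpa using hxm
      simp only [aStep, bStep, hc, Bool.false_eq_true, if_false,
        if_neg (by omega : ¬ t < x), if_neg (fun h : x = t ∧ 0 < ties => by omega)]
      refine ih acc seq ties ?_ hlt hti
      intro v hv
      rw [hgt v hv, List.count_cons_of_ne (by omega : x ≠ v)]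

-- ===== VERDICT (by name: the statement is the Claim_ definition above) =====
theorem maxSubsequence_spec : Claim_equal_maxSubsequence := by
  intro nums k _ hk
  unfold Spec_maxSubsequence maxSubsequence maxSubsequence_alt
  have hperm : (PySem.List.sorted nums (fun x => x) true).Perm nums :=
    PySem.List.sorted_perm nums (fun x => x) true
  have hlen : (PySem.List.sorted nums (fun x => x) true).length = nums.length :=
    PySem.List.length_sorted nums (fun x => x) true
  have hpw : (PySem.List.sorted nums (fun x => x) true).Pairwise (fun a b => b ≤ a) :=
    PySem.List.sorted_pairwise_rev nums (fun x => x)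
  set S := PySem.List.sorted nums (fun x => x) true with hSdef
  by_cases hk0 : k ≤ 0
  · -- k ≤ 0 : A's pool is the empty slice (k = 0, or k negative with len(nums)+k ≤ 0)
    rw [if_pos hk0]
    rcases lt_or_eq_of_le hk0 with hneg | hz
    · have hn : (nums.length : Int) + k ≤ 0 := by
        rcases hk with h | h
        · omega
        · exact h
      have hm : k = -(((-k).toNat : Nat) : Int) := by omega
      have h0 : PySem.List.slice S none (some k) = [] := by
        rw [hm, PySem.List.slice_to_neg_natCast S (-k).toNat (by omega)]
        have : S.length - (-k).toNat = 0 := by omega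
        rw [this, List.take_zero]
      rw [h0, foldA_nil_pool]
    · subst hz
      have h0 : PySem.List.slice S none (some (0 : Int)) = [] := by
        simpa using PySem.List.slice_to_natCast S 0
      rw [h0, foldA_nil_pool]
  · by_cases hkn : (nums.length : Int) ≤ k
    · -- k ≥ len(nums) : A's pool is a permutation of nums, everything is kept
      rw [if_neg hk0, if_pos hkn]
      have hksl : PySem.List.slice S none (some k) = S := by
        have h1 := PySem.List.slice_to_natCast S k.toNat
        rw [Int.toNat_of_nonneg (by omega)] at h1
        rw [h1, List.take_of_length_le (by omega : S.length ≤ k.toNat)]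
      rw [hksl]
      simpa using foldA_all nums [] S (fun v => (hperm.count_eq v).ge)
    · -- 0 < k < len(nums) : the threshold case
      push Not at hk0 hkn
      have hk1 : 1 ≤ k.toNat := by omega
      have hklen : k.toNat < nums.length := by omega
      have hidx : k.toNat - 1 < S.length := by omega
      have hget : PySem.List.pyGet? S (k - 1) = some (S[k.toNat - 1]'hidx) := by
        have he : k - 1 = ((k.toNat - 1 : Nat) : Int) := by omega
        rw [he, PySem.List.pyGet?_natCast, List.getElem?_eq_getElem hidx]
      rw [if_neg (by omega), if_neg (by omega), hget]
      set t := S[k.toNat - 1]'hidx with htdef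
      have hsl : PySem.List.slice S none (some k) = S.take k.toNat := by
        have h1 := PySem.List.slice_to_natCast S k.toNat
        rw [Int.toNat_of_nonneg (by omega)] at h1
        exact h1
      rw [hsl]
      have hmono : ∀ (i j : Nat) (hi : i < S.length) (hj : j < S.length),
          i ≤ j → S[j] ≤ S[i] := by
        intro i j hi hj hij
        rcases eq_or_lt_of_le hij with rfl | hlt'
        · exact le_rfl
        · exact List.pairwise_iff_getElem.mp hpw i j hi hj hlt'
      have htake : ∀ y ∈ S.take k.toNat, t ≤ y := by
        intro y hy
        obtain ⟨i, hi, rfl⟩ := List.mem_iff_getElem.mp hy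
        rw [List.getElem_take]
        exact hmono i (k.toNat - 1) (by simp at hi; omega) hidx (by simp at hi; omega)
      have hdrop : ∀ y ∈ S.drop k.toNat, y ≤ t := by
        intro y hy
        obtain ⟨i, hi, rfl⟩ := List.mem_iff_getElem.mp hy
        rw [List.getElem_drop]
        exact hmono (k.toNat - 1) (k.toNat + i) hidx (by simp at hi; omega) (by omega)
      have hsplitc : ∀ v : Int, List.count v S =
          List.count v (S.take k.toNat) + List.count v (S.drop k.toNat) := by
        intro v
        conv_lhs => rw [← List.take_append_drop k.toNat S]
        rw [List.count_append]
      have hgt0 : ∀ v, t < v → List.count v (S.take k.toNat) = List.count v nums := by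
        intro v hv
        have hdz : List.count v (S.drop k.toNat) = 0 := by
          rw [List.count_eq_zero]
          intro hmem
          exact absurd (hdrop v hmem) (by omega)
        have h2 := hperm.count_eq v
        have h3 := hsplitc v
        omega
      have hlt0 : ∀ v, v < t → List.count v (S.take k.toNat) = 0 := by
        intro v hv
        rw [List.count_eq_zero]
        intro hmem
        exact absurd (htake v hmem) (by omega)
      have hgtP : List.countP (fun x => decide (t < x)) nums
          = List.countP (fun x => decide (t < x)) (S.take k.toNat) := by
        have hdz : List.countP (fun x => decide (t < x)) (S.drop k.toNat) = 0 := by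
          rw [List.countP_eq_zero]
          intro a ha
          simpa using not_lt.mpr (hdrop a ha)
        have hp := (hperm.countP_eq (fun x => decide (t < x)))
        have hs : List.countP (fun x => decide (t < x)) S
            = List.countP (fun x => decide (t < x)) (S.take k.toNat)
              + List.countP (fun x => decide (t < x)) (S.drop k.toNat) := by
          conv_lhs => rw [← List.take_append_drop k.toNat S]
          rw [List.countP_append]
        omega
      have hlentake : (S.take k.toNat).length = k.toNat := by
        rw [List.length_take]; omega
      have htc : (List.count t (S.take k.toNat) : Int)
          = k - (List.countP (fun x => decide (t < x)) nums : Int) := by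
        have hsplit := List.length_eq_countP_add_countP (fun x => decide (t < x))
          (l := S.take k.toNat)
        have heqc : List.countP (fun a => decide ¬ decide (t < a) = true) (S.take k.toNat)
            = List.count t (S.take k.toNat) := by
          rw [List.count_eq_countP]
          apply List.countP_congr
          intro y hy
          have hty := htake y hy
          constructor
          · intro h
            simp only [decide_eq_true_eq] at h
            simp only [beq_iff_eq]
            omega
          · intro h
            simp only [beq_iff_eq] at h
            simp only [decide_eq_true_eq]
            omega
        rw [hgtP]
        have hkk : (k.toNat : Int) = k := Int.toNat_of_nonneg (by omega)
        omega
      exact foldAB t nums [] (S.take k.toNat)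
        (k - (List.countP (fun x => decide (t < x)) nums : Int)) hgt0 hlt0 htc
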